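-- pv_equiv track=rewrite | github.com/hk3dva/Borodin_avto_6_semestr | main.py | varCheck
-- ===== SOURCE A (Python) =====
-- def varCheck(var):
--     variant = [int(el) for el in var]
--     if len(variant) != 9:
--         return False
--     if not (1 <= variant[0] <= 4):
--         return False
--     if not (1 <= variant[8] <= 6):
--         return False
--     if not (1 <= variant[1] <= 8) or not (1 <= variant[2] <= 8) or not (1 <= variant[4] <= 8) or not (
--             1 <= variant[7] <= 8):
--         return False
--     if not (1 <= variant[3] <= 5) or not (1 <= variant[5] <= 5) or not (1 <= variant[6] <= 5):
--         return False
--     return True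
-- ===== SOURCE B (Python) =====
-- # Bitmask membership + recursive walk: each position's allowed values are the set
-- # bits of a mask; length and bounds are checked in one simultaneous recursion.
-- MASKS = [0x1E, 0x1FE, 0x1FE, 0x3E, 0x1FE, 0x3E, 0x3E, 0x1FE, 0x7E]
--
-- def varCheck(var):
--     variant = [int(el) for el in var]
--
--     def go(vs, ms):
--         if not ms:
--             return not vs
--         if not vs:
--             return False
--         v = vs[0]
--         return v >= 0 and (ms[0] >> v) & 1 == 1 and go(vs[1:], ms[1:])
--
--     return go(variant, MASKS)
-- ===== Notes on version B (the rewrite author's own statement) =====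
-- stated objective: alternative
-- what changed: Replaced the length check plus chain of per-index range comparisons by bitmask set-membership: each position's admissible values are the set bits of a mask, and one recursion walks the list and the mask list together, so length mismatch and bound violations fall out of the same structural recursion.
import Mathlib
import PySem

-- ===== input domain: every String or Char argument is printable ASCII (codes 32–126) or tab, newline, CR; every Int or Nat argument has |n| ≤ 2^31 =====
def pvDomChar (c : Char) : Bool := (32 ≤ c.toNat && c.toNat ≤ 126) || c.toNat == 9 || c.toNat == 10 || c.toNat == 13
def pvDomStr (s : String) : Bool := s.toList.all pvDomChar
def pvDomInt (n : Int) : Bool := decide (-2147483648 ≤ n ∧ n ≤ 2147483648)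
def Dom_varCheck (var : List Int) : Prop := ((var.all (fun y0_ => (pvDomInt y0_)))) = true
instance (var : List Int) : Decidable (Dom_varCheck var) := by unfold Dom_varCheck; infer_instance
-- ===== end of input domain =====

-- B replaces A's length check + chained per-index range comparisons by bitmask set-membership tested in one simultaneous recursion over the list and the mask list (objective: alternative).


-- ===== PORT A =====
-- int(el) on an int is the identity, so the comprehension is a map of the identity.
def varCheck (var : List Int) : Bool :=
  let variant := var.map (fun el => el)
  if variant.length ≠ 9 then false
  else if ¬ (1 ≤ PySem.List.pyGetD variant 0 0 ∧ PySem.List.pyGetD variant 0 0 ≤ 4) then false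
  else if ¬ (1 ≤ PySem.List.pyGetD variant 8 0 ∧ PySem.List.pyGetD variant 8 0 ≤ 6) then false
  else if ¬ (1 ≤ PySem.List.pyGetD variant 1 0 ∧ PySem.List.pyGetD variant 1 0 ≤ 8) ∨
          ¬ (1 ≤ PySem.List.pyGetD variant 2 0 ∧ PySem.List.pyGetD variant 2 0 ≤ 8) ∨
          ¬ (1 ≤ PySem.List.pyGetD variant 4 0 ∧ PySem.List.pyGetD variant 4 0 ≤ 8) ∨
          ¬ (1 ≤ PySem.List.pyGetD variant 7 0 ∧ PySem.List.pyGetD variant 7 0 ≤ 8) then false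
  else if ¬ (1 ≤ PySem.List.pyGetD variant 3 0 ∧ PySem.List.pyGetD variant 3 0 ≤ 5) ∨
          ¬ (1 ≤ PySem.List.pyGetD variant 5 0 ∧ PySem.List.pyGetD variant 5 0 ≤ 5) ∨
          ¬ (1 ≤ PySem.List.pyGetD variant 6 0 ∧ PySem.List.pyGetD variant 6 0 ≤ 5) then false
  else true

-- ===== PORT B =====
-- MASKS of Source B: the set bits of mask i are the allowed values at position i.
def pvMasks : List Nat := [0x1E, 0x1FE, 0x1FE, 0x3E, 0x1FE, 0x3E, 0x3E, 0x1FE, 0x7E]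

-- go of Source B: v >= 0 guards the shift, so v.toNat is exact where the test is reached.
def pvGo : List Int → List Nat → Bool
  | vs, [] => vs.isEmpty
  | [], _ :: _ => false
  | v :: vs, m :: ms => decide (0 ≤ v) && ((m >>> v.toNat) &&& 1 == 1) && pvGo vs ms

def varCheck_alt (var : List Int) : Bool :=
  let variant := var.map (fun el => el)
  pvGo variant pvMasks

-- ===== PRECONDITION & SPEC =====
def Spec_varCheck (var : List Int) (out : Bool) : Prop := out = varCheck_alt var
instance (var : List Int) (out : Bool) : Decidable (Spec_varCheck var out) := by unfold Spec_varCheck; infer_instance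

-- ===== CLAIM (what is proved, stated in full; the proofs are below) =====
def Claim_equal_varCheck : Prop := ∀ (var : List Int), Dom_varCheck var → Spec_varCheck var (varCheck var)

-- ===== LEMMAS AND PROOFS =====

-- bits above hi of a mask < 2^(hi+1) are clear; bits up to hi are checked by decide
theorem mask_test (mask hi : Nat) (hlt : mask < 2 ^ (hi + 1))
    (hk : ∀ k < hi + 1, (mask >>> k % 2 = 1 ↔ (1 ≤ k ∧ k ≤ hi))) :
    ∀ n : Nat, (mask >>> n % 2 = 1 ↔ (1 ≤ n ∧ n ≤ hi)) := by
  intro n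
  by_cases h : n < hi + 1
  · exact hk n h
  · have hz : mask >>> n = 0 := by
      rw [Nat.shiftRight_eq_div_pow]
      exact Nat.div_eq_of_lt (lt_of_lt_of_le hlt (Nat.pow_le_pow_right (by norm_num) (by omega)))
    rw [hz]; omega

-- lift to Int indices: an even mask rejects v < 0 too (v.toNat = 0 hits the clear bit 0)
theorem int_mask (mask hi : Nat) (h0 : mask % 2 = 0)
    (H : ∀ n : Nat, (mask >>> n % 2 = 1 ↔ (1 ≤ n ∧ n ≤ hi))) (v : Int) :
    (mask >>> v.toNat % 2 = 1 ↔ (1 ≤ v ∧ v ≤ (hi : Int))) := by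
  by_cases h : 0 ≤ v
  · rw [H]; omega
  · have hv : v.toNat = 0 := by omega
    rw [hv, Nat.shiftRight_zero]; omega

theorem bit4 (v : Int) : 30 >>> v.toNat % 2 = 1 ↔ (1 ≤ v ∧ v ≤ (4 : Int)) :=
  int_mask 30 4 (by norm_num) (mask_test 30 4 (by norm_num) (by decide)) v

theorem bit8 (v : Int) : 510 >>> v.toNat % 2 = 1 ↔ (1 ≤ v ∧ v ≤ (8 : Int)) :=
  int_mask 510 8 (by norm_num) (mask_test 510 8 (by norm_num) (by decide)) v

theorem bit5 (v : Int) : 62 >>> v.toNat % 2 = 1 ↔ (1 ≤ v ∧ v ≤ (5 : Int)) :=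
  int_mask 62 5 (by norm_num) (mask_test 62 5 (by norm_num) (by decide)) v

theorem bit6 (v : Int) : 126 >>> v.toNat % 2 = 1 ↔ (1 ≤ v ∧ v ≤ (6 : Int)) :=
  int_mask 126 6 (by norm_num) (mask_test 126 6 (by norm_num) (by decide)) v

-- ===== VERDICT (by name: the statement is the Claim_ definition above) =====
theorem varCheck_spec : Claim_equal_varCheck := by
  intro var _
  unfold Spec_varCheck varCheck varCheck_alt
  match var with
  | [a, b, c, d, e, f, g, h, i] =>
    simp only [pvMasks, pvGo, List.map]
    rw [Bool.eq_iff_iff]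
    simp [PySem.List.pyGetD, PySem.List.pyGet?, PySem.List.pyIdx?]
    simp only [bit4, bit8, bit5, bit6]
    omega
  | [] => simp [pvGo, pvMasks]
  | [a] => simp [pvGo, pvMasks]
  | [a,b] => simp [pvGo, pvMasks]
  | [a,b,c] => simp [pvGo, pvMasks]
  | [a,b,c,d] => simp [pvGo, pvMasks]
  | [a,b,c,d,e] => simp [pvGo, pvMasks]
  | [a,b,c,d,e,f] => simp [pvGo, pvMasks]
  | [a,b,c,d,e,f,g] => simp [pvGo, pvMasks]
  | [a,b,c,d,e,f,g,h] => simp [pvGo, pvMasks]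
  | a::b::c::d::e::f::g::h::i::j::rest => simp [pvGo, pvMasks, List.map]
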